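-- pv_equiv track=rewrite | github.com/franchescaleung/ICS-31- | lab6.py | list_of_words
-- ===== SOURCE A (Python) =====
-- def list_of_words(s: str) -> "list of individual words":
--     '''takes list of strings and returns a list of individual words'''
--     table1 = str.maketrans("/.,\!@#?$\"%^&*()-", "                 ")
--     l = s.translate(table1)
--     words = l.split()
--     new = []
--     for item in words:
--         item = item.strip()
--         new.append(item)
--     return new
-- ===== SOURCE B (Python) =====
-- def list_of_words(s: str) -> "list of individual words":
--     '''takes list of strings and returns a list of individual words'''
--     delims = set('/.,\\!@#?$"%^&*()-')
--     words = []
--     buf = []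
--     for ch in s:
--         if ch in delims or ch.isspace():
--             if buf:
--                 words.append(''.join(buf))
--                 buf = []
--         else:
--             buf.append(ch)
--     if buf:
--         words.append(''.join(buf))
--     return words
-- ===== Notes on version B (the rewrite author's own statement) =====
-- stated objective: alternative
-- what changed: Replaces translate-to-spaces + split() + a redundant strip loop with a single character-by-character pass that buffers non-delimiter characters and flushes the buffer at each delimiter (punctuation or whitespace).
import Mathlib
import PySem

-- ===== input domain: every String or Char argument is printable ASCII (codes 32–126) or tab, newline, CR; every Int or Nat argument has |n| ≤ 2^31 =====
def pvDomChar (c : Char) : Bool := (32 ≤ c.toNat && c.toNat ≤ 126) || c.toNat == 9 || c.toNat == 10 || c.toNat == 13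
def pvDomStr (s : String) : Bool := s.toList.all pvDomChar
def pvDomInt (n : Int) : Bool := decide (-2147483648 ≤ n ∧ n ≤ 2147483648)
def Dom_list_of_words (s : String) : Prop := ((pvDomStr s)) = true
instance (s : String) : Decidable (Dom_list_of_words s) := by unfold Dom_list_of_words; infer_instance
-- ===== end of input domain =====

-- B replaces translate-to-spaces + split() + a redundant strip loop with a single
-- character pass that buffers non-delimiter characters and flushes at each delimiter
-- (objective: alternative decomposition, same O(n) cost).


-- ===== PORT A =====
-- the 17 characters of A's maketrans source string "/.,\!@#?$\"%^&*()-"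
def pvPunct : List Char := ['/', '.', ',', '\\', '!', '@', '#', '?', '$', '"', '%', '^', '&', '*', '(', ')', '-']
-- s.translate(table1): the table maps each pvPunct character to ' '; hand port, exact per char
def pvTr (c : Char) : Char := if pvPunct.contains c then ' ' else c

def list_of_words (s : String) : List String :=
  let l : String := String.ofList (s.toList.map pvTr)
  let words := PySem.Str.split₀ l
  words.foldl (fun new item => new ++ [PySem.Str.strip item]) []

-- ===== PORT B =====
-- B's delimiter set is the same 17 punctuation characters (set literal in Source B), so it
-- shares the pvPunct constant above
def pvIsDelim (c : Char) : Bool := pvPunct.contains c || PySem.Chars.isspace c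

-- one step of B's loop: state = (words so far, current buffer)
def pvStep (st : List String × List Char) (ch : Char) : List String × List Char :=
  if pvIsDelim ch then
    if st.2.isEmpty then st else (st.1 ++ [String.ofList st.2], [])
  else (st.1, st.2 ++ [ch])

def list_of_words_alt (s : String) : List String :=
  let fin := s.toList.foldl pvStep ([], [])
  if fin.2.isEmpty then fin.1 else fin.1 ++ [String.ofList fin.2]

-- ===== PRECONDITION & SPEC =====
def Spec_list_of_words (s : String) (out : List String) : Prop := out = list_of_words_alt s
instance (s : String) (out : List String) : Decidable (Spec_list_of_words s out) := by unfold Spec_list_of_words; infer_instance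

-- ===== CLAIM (what is proved, stated in full; the proofs are below) =====
def Claim_equal_list_of_words : Prop := ∀ (s : String), Dom_list_of_words s → Spec_list_of_words s (list_of_words s)

-- ===== LEMMAS AND PROOFS =====

-- translating a character and asking "space?" is exactly B's delimiter test
theorem pv_isspace_tr (c : Char) : PySem.Chars.isspace (pvTr c) = pvIsDelim c := by
  unfold pvTr pvIsDelim
  by_cases h : pvPunct.contains c = true
  · rw [if_pos h, h]
    simp only [Bool.true_or]
    decide
  · rw [if_neg h, Bool.eq_false_iff.mpr h]
    simp

-- a word with no whitespace characters is unchanged by strip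
theorem pv_strip_id (w : List Char) (h : ∀ c ∈ w, PySem.Chars.isspace c = false) :
    PySem.Chars.strip w = w := by
  have hd : ∀ (v : List Char), (∀ c ∈ v, PySem.Chars.isspace c = false) →
      List.dropWhile PySem.Chars.isspace v = v := by
    intro v hv
    rw [List.dropWhile_eq_self_iff]
    cases v with
    | nil => simp
    | cons a l => simp [hv a (by simp)]
  simp [PySem.Chars.strip, PySem.Chars.rstrip, PySem.Chars.lstrip, hd w h,
    hd w.reverse (by simpa using h)]

-- bridge: A's split₀ on the translated text, then strip, equals B's buffer loop
theorem pv_bridge (cs : List Char) (buf : List Char) (ws : List String)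
    (hbuf : ∀ c ∈ buf, PySem.Chars.isspace c = false)
    (hws : ∀ w ∈ ws, ∀ c ∈ w.toList, PySem.Chars.isspace c = false) :
    (PySem.Chars.split₀.go (cs.map pvTr) buf.reverse ((ws.map String.toList).reverse)).map
        (fun w => String.ofList (PySem.Chars.strip w))
    = (let fin := cs.foldl pvStep (ws, buf);
       if fin.2.isEmpty then fin.1 else fin.1 ++ [String.ofList fin.2]) := by
  induction cs generalizing buf ws with
  | nil =>
    simp only [List.map_nil, List.foldl_nil]
    rw [PySem.Chars.split₀.go]
    by_cases hb : buf = []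
    · subst hb
      simp only [List.reverse_nil, List.isEmpty_nil, if_true, List.reverse_reverse]
      rw [List.map_map]
      conv_rhs => rw [show ws = ws.map id by simp]
      apply List.map_congr_left
      intro w hw
      simp [pv_strip_id w.toList (hws w hw)]
    · have h1 : buf.reverse.isEmpty = false := by simp [hb]
      have h2 : (buf : List Char).isEmpty = false := by simp [hb]
      simp only [h1, h2, Bool.false_eq_true, if_false, List.reverse_cons,
        List.reverse_reverse, List.map_append, List.map_map, List.map_cons, List.map_nil]
      rw [pv_strip_id buf hbuf]
      congr 1
      conv_rhs => rw [show ws = ws.map id by simp]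
      apply List.map_congr_left
      intro w hw
      simp [pv_strip_id w.toList (hws w hw)]
  | cons c rest ih =>
    simp only [List.map_cons, List.foldl_cons]
    rw [PySem.Chars.split₀.go]
    by_cases hd : pvIsDelim c = true
    · have hsp : PySem.Chars.isspace (pvTr c) = true := by rw [pv_isspace_tr]; exact hd
      simp only [hsp, if_true]
      by_cases hb : buf = []
      · subst hb
        simp only [List.reverse_nil, List.isEmpty_nil, if_true]
        have := ih [] ws (by simp) hws
        simp only [List.reverse_nil] at this
        rw [this]
        simp [pvStep, hd]
      · have h1 : buf.reverse.isEmpty = false := by simp [hb]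
        have h2 : (buf : List Char).isEmpty = false := by simp [hb]
        simp only [h1, Bool.false_eq_true, if_false, List.reverse_reverse]
        have hacc : (buf :: (ws.map String.toList).reverse)
            = (((ws ++ [String.ofList buf]).map String.toList).reverse) := by
          simp
        rw [hacc]
        have := ih [] (ws ++ [String.ofList buf]) (by simp)
          (by
            intro w hw
            rcases List.mem_append.mp hw with h | h
            · exact hws w h
            · simp only [List.mem_singleton] at h
              subst h
              simpa using hbuf)
        simp only [List.reverse_nil] at this
        rw [this]
        simp [pvStep, hd, h2]
    · have hd' : pvIsDelim c = false := by simpa using hd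
      have hpc : pvPunct.contains c = false := by
        unfold pvIsDelim at hd'
        simp only [Bool.or_eq_false_iff] at hd'
        exact hd'.1
      have hnc : pvTr c = c := by unfold pvTr; rw [if_neg (by simpa using hpc)]
      have hc : PySem.Chars.isspace c = false := by
        have h := pv_isspace_tr c
        rw [hnc, hd'] at h
        exact h
      simp only [hnc, hc, Bool.false_eq_true, if_false]
      have hrev : (c :: buf.reverse) = (buf ++ [c]).reverse := by simp
      rw [hrev]
      have := ih (buf ++ [c]) ws
        (by
          intro x hx
          rcases List.mem_append.mp hx with h | h
          · exact hbuf x h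
          · simp only [List.mem_singleton] at h; subst h; exact hc)
        hws
      rw [this]
      simp [pvStep, hd]

-- ===== VERDICT (by name: the statement is the Claim_ definition above) =====
theorem list_of_words_spec : Claim_equal_list_of_words := by
  unfold Claim_equal_list_of_words
  intro s _
  unfold Spec_list_of_words list_of_words list_of_words_alt
  simp only [PySem.Str.split₀, String.toList_ofList]
  rw [PySem.List.foldl_append_singleton_eq_map]
  rw [List.map_map]
  have hcomp : (PySem.Str.strip ∘ String.ofList)
      = (fun w => String.ofList (PySem.Chars.strip w)) := by
    funext w
    simp [PySem.Str.strip, String.toList_ofList]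
  rw [hcomp]
  have := pv_bridge s.toList [] [] (by simp) (by simp)
  simpa [PySem.Chars.split₀] using this
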